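-- pv_equiv track=rewrite | github.com/legofanclub/advent-of-code-2023 | day 12/q1/code.py | numThatWork
-- ===== SOURCE A (Python) =====
-- def correct(record, info):
--     # returns True if the record matches info
--     record = "".join(record)
--     record = record.split(".")
--     record = [x for x in record if len(x) > 0]
--     counts = [len(x) for x in record]
--     return counts == info
--
-- def numThatWork(record, info, built, i):
--     if len(built) == len(record):
--         if correct(built, info):
--             return 1
--         else:
--             return 0
--
--     if record[i] == "?":
--         good = built.copy() + ["."]
--         bad = built.copy() + ["#"]
--         return numThatWork(record, info, good, i + 1) + numThatWork(record, info, bad, i + 1)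
--     else:
--         built.append(record[i])
--         return numThatWork(record, info, built, i + 1)
-- ===== SOURCE B (Python) =====
-- def numThatWork(record, info, built, i):
--     # memoized DP: count completions by record position and automaton state
--     # (groups matched so far, length of the current '#'-run); None = dead state
--     m = len(info)
--
--     def step(state, c):
--         if state is None:
--             return None
--         g, r = state
--         if c == ".":
--             if r == 0:
--                 return (g, 0)
--             if g < m and info[g] == r:
--                 return (g + 1, 0)
--             return None
--         return (g, r + 1)
--
--     memo = {}
--
--     def count(j, state):
--         if state is None:
--             return 0
--         if len(built) + (j - i) == len(record):
--             g, r = state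
--             return 1 if (r == 0 and g == m) or (r > 0 and g + 1 == m and info[g] == r) else 0
--         if (j, state) in memo:
--             return memo[(j, state)]
--         c = record[j]
--         if c == "?":
--             v = count(j + 1, step(state, ".")) + count(j + 1, step(state, "#"))
--         else:
--             v = count(j + 1, step(state, c))
--         memo[(j, state)] = v
--         return v
--
--     state = (0, 0)
--     for c in "".join(built):
--         state = step(state, c)
--     return count(i, state)
-- ===== Notes on version B (the rewrite author's own statement) =====
-- stated objective: alternative
-- what changed: A enumerates every '.'/'#' assignment of the '?' characters by binary recursion and checks each completed record against info; B counts completions with a memoized DP keyed by (record position, automaton state = groups matched + current run length), pruning dead states and never building candidate lists.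
import Mathlib
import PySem

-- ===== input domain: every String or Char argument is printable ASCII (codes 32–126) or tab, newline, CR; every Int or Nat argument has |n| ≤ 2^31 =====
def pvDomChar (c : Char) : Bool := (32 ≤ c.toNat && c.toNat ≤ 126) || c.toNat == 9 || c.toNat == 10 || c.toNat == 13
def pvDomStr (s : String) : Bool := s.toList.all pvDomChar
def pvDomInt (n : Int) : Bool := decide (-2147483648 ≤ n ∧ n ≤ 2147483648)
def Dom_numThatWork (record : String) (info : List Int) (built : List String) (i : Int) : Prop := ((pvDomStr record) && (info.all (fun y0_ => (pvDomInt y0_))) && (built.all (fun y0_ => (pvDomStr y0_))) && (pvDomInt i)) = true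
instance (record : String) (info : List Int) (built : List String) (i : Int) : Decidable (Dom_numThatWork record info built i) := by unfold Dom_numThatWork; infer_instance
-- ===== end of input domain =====

-- B counts the valid completions by a memoized DP over (record position, automaton state
-- (groups matched, current run length)) instead of A's enumeration of all '.'/'#'
-- assignments of the '?' characters with a final check; A also mutates `built` in place in
-- its non-'?' branch (B does not) — the equivalence proved here is about the return value only.

-- ===== PORT A =====
-- port of helper `correct`
def correctA (built : List String) (info : List Int) : Bool :=
  let joined := PySem.Str.join "" built                             -- "".join(record)
  let pieces := (PySem.Str.split? joined ".").getD []               -- record.split(".") (separator nonempty, never none)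
  let pieces := pieces.filter (fun x => decide (0 < PySem.Str.len x))  -- [x for x in record if len(x) > 0]
  let counts := pieces.map PySem.Str.len                            -- [len(x) for x in record]
  counts == info                                                    -- counts == info

def numThatWork (record : String) (info : List Int) (built : List String) (i : Int) : Int :=
  if (built.length : Int) = PySem.Str.len record then
    (if correctA built info then 1 else 0)
  else
    match h : PySem.Str.pyGet? record i with
    | none => 0                                                     -- IndexError on record[i]: outside Pre_
    | some c =>
      if c = '?' then
        numThatWork record info (built ++ ["."]) (i + 1) + numThatWork record info (built ++ ["#"]) (i + 1)
      else
        numThatWork record info (built ++ [String.ofList [c]]) (i + 1)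
termination_by (PySem.Str.len record - i).toNat
decreasing_by
  all_goals
    rw [PySem.Str.pyGet?, PySem.Chars.pyGet?_eq_listPyGet?] at h
    have hr : ¬ (PySem.List.pyGet? record.toList i = none) := by simp [h]
    rw [PySem.List.pyGet?_eq_none_iff] at hr
    have : i < (record.toList.length : Int) := by
      rcases not_not.mp hr with ⟨_, h2⟩; exact h2
    simp only [PySem.Str.len]; omega

-- ===== PORT B =====
-- Source B's `step`: advance an automaton state by one character (none = dead state)
def stepO (m : Int) (info : List Int) (s : Option (Int × Int)) (c : Char) : Option (Int × Int) :=
  match s with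
  | none => none
  | some (g, r) =>
    if c = '.' then
      if r = 0 then some (g, 0)
      else if g < m ∧ PySem.List.pyGet? info g == some r then some (g + 1, 0)
      else none
    else some (g, r + 1)

-- the acceptance condition of Source B's base case
def acceptB (m : Int) (info : List Int) (g r : Int) : Bool :=
  (r == 0 && g == m) || (decide (0 < r) && (g + 1 == m) && (PySem.List.pyGet? info g == some r))

-- Source B's memoized `count` (the memo dict is threaded through explicitly)
def countM (record : String) (info : List Int) (m bLen iA : Int) (j : Int)
    (s : Option (Int × Int)) (memo : PySem.Dict (Int × (Int × Int)) Int) :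
    Int × PySem.Dict (Int × (Int × Int)) Int :=
  match s with
  | none => (0, memo)
  | some st =>
    if bLen + (j - iA) = PySem.Str.len record then
      ((if acceptB m info st.1 st.2 then 1 else 0), memo)
    else if memo.contains (j, st) then (memo.getD (j, st) 0, memo)
    else
      match h : PySem.Str.pyGet? record j with
      | none => (0, memo)                                           -- IndexError on record[j]: outside Pre_
      | some c =>
        if c = '?' then
          let p1 := countM record info m bLen iA (j + 1) (stepO m info (some st) '.') memo
          let p2 := countM record info m bLen iA (j + 1) (stepO m info (some st) '#') p1.2
          (p1.1 + p2.1, p2.2.insert (j, st) (p1.1 + p2.1))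
        else
          let p := countM record info m bLen iA (j + 1) (stepO m info (some st) c) memo
          (p.1, p.2.insert (j, st) p.1)
termination_by (PySem.Str.len record - j).toNat
decreasing_by
  all_goals
    rw [PySem.Str.pyGet?, PySem.Chars.pyGet?_eq_listPyGet?] at h
    have hr : ¬ (PySem.List.pyGet? record.toList j = none) := by simp [h]
    rw [PySem.List.pyGet?_eq_none_iff] at hr
    have : j < (record.toList.length : Int) := by
      rcases not_not.mp hr with ⟨_, h2⟩; exact h2
    simp only [PySem.Str.len]; omega

def numThatWork_alt (record : String) (info : List Int) (built : List String) (i : Int) : Int :=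
  let m := (info.length : Int)
  -- state = (0, 0); for c in "".join(built): state = step(state, c)
  let state := ((built.map String.toList).flatten).foldl (fun s c => stepO m info s c) (some (0, 0))
  (countM record info m (built.length : Int) i i state PySem.Dict.empty).1

-- ===== PRECONDITION & SPEC =====
-- Pre_ is exactly the set of inputs on which the Python A returns: with b = len(built) < n = len(record)
-- A reads record[i], …, record[i + (n-b-1)] (negative indices wrap), so it raises IndexError unless
-- -n ≤ i and i ≤ b; with b > n it always ends in an IndexError; with b = n it returns at once.
def Pre_numThatWork (record : String) (info : List Int) (built : List String) (i : Int) : Prop :=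
  (built.length : Int) = PySem.Str.len record ∨
    ((built.length : Int) < PySem.Str.len record ∧
      -(PySem.Str.len record) ≤ i ∧ i ≤ (built.length : Int))
instance (record : String) (info : List Int) (built : List String) (i : Int) : Decidable (Pre_numThatWork record info built i) := by unfold Pre_numThatWork; infer_instance

def pvWitness_numThatWork : String × List Int × List String × Int := ("?#?", [1, 1], [], 0)

def Spec_numThatWork (record : String) (info : List Int) (built : List String) (i : Int) (out : Int) : Prop := out = numThatWork_alt record info built i
instance (record : String) (info : List Int) (built : List String) (i : Int) (out : Int) : Decidable (Spec_numThatWork record info built i out) := by unfold Spec_numThatWork; infer_instance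

-- ===== CLAIM (what is proved, stated in full; the proofs are below) =====
def Claim_equal_numThatWork : Prop := ∀ (record : String) (info : List Int) (built : List String) (i : Int), Dom_numThatWork record info built i → Pre_numThatWork record info built i → Spec_numThatWork record info built i (numThatWork record info built i)

-- ===== LEMMAS AND PROOFS =====

-- ---------- proof-only definitions ----------

-- the number of ways to complete the record from automaton state `s` through the
-- still-unfilled characters `cs` ('?' branches, everything else is literal)
def cntB (m : Int) (info : List Int) : List Char → Option (Int × Int) → Int
  | [], s => match s with
    | none => 0
    | some p => if acceptB m info p.1 p.2 then 1 else 0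
  | c :: cs, s =>
    if c = '?' then
      cntB m info cs (stepO m info s '.') + cntB m info cs (stepO m info s '#')
    else cntB m info cs (stepO m info s c)

-- run the automaton over literal characters (no branching)
def runB (m : Int) (info : List Int) (s : Option (Int × Int)) (l : List Char) : Option (Int × Int) :=
  l.foldl (fun s c => stepO m info s c) s

-- group lengths of a character list read with an open run of length r in front
def groupsW : Nat → List Char → List Int
  | r, [] => if 0 < r then [(r : Int)] else []
  | r, c :: cs => if c = '.' then (if 0 < r then (r : Int) :: groupsW 0 cs else groupsW 0 cs) else groupsW (r + 1) cs

-- structural split on '.'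
def mySplit : List Char → List (List Char)
  | [] => [[]]
  | c :: cs => if c = '.' then [] :: mySplit cs else (mySplit cs).modifyHead (c :: ·)

-- the characters A reads: record[i], record[i+1], … (`need` of them)
def suffChars (record : String) : Int → Nat → List Char
  | _, 0 => []
  | i, n + 1 => (PySem.Str.pyGet? record i).getD '.' :: suffChars record (i + 1) n

-- every memo entry is the count the pure recursion would give at its key
def MemoOK (record : String) (info : List Int) (m bLen iA : Int)
    (memo : PySem.Dict (Int × (Int × Int)) Int) : Prop :=
  ∀ (j : Int) (st : Int × Int) (v : Int), memo.get? (j, st) = some v →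
    v = cntB m info (suffChars record j (PySem.Str.len record - bLen - (j - iA)).toNat) (some st)

-- ---------- basic lemmas ----------

theorem cntB_none (m : Int) (info : List Int) (cs : List Char) : cntB m info cs none = 0 := by
  induction cs with
  | nil => rfl
  | cons c cs ih => by_cases h : c = '?' <;> simp [cntB, h, ih, stepO]

theorem runB_none (m : Int) (info : List Int) (l : List Char) : runB m info none l = none := by
  induction l with
  | nil => rfl
  | cons c cs ih => simpa [runB, stepO] using ih

theorem runB_append (m : Int) (info : List Int) (s : Option (Int × Int)) (l₁ l₂ : List Char) :
    runB m info s (l₁ ++ l₂) = runB m info (runB m info s l₁) l₂ := by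
  simp [runB, List.foldl_append]

theorem mySplit_ne_nil (cs : List Char) : mySplit cs ≠ [] := by
  cases cs with
  | nil => simp [mySplit]
  | cons c cs =>
    by_cases h : c = '.' <;> simp [mySplit, h]
    cases hm : mySplit cs with
    | nil => exact absurd hm (mySplit_ne_nil cs)
    | cons a t => simp [List.modifyHead]

theorem modifyHead_fun_id {α : Type} (l : List α) : l.modifyHead (fun x => x) = l := by
  cases l <;> simp

theorem go_eq : ∀ (fuel : Nat) (l cur : List Char) (acc : List (List Char)), l.length < fuel →
    PySem.Chars.splitOn.go ['.'] fuel l cur acc =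
      acc.reverse ++ (mySplit l).modifyHead (cur.reverse ++ ·) := by
  intro fuel
  induction fuel with
  | zero => intro l cur acc h; omega
  | succ fuel ih =>
    intro l cur acc h
    cases l with
    | nil =>
      simp [PySem.Chars.splitOn.go, mySplit, List.modifyHead]
    | cons c rest =>
      by_cases hc : c = '.'
      · subst hc
        have hpre : (['.'] : List Char).isPrefixOf ('.' :: rest) = true := by
          simp [List.isPrefixOf]
        rw [PySem.Chars.splitOn.go]
        simp only [hpre, if_true, List.length_singleton, List.drop_succ_cons, List.drop_zero]
        rw [ih rest [] (cur.reverse :: acc) (by simpa using Nat.lt_of_succ_lt_succ h)]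
        simp [mySplit, modifyHead_fun_id]
      · have hpre : (['.'] : List Char).isPrefixOf (c :: rest) = false := by
          simp [List.isPrefixOf]; exact fun hh => absurd hh.symm hc
        rw [PySem.Chars.splitOn.go]
        simp only [hpre, Bool.false_eq_true, if_false]
        rw [ih rest (c :: cur) acc (by simpa using Nat.lt_of_succ_lt_succ h)]
        rcases hm : mySplit rest with _ | ⟨a, t⟩
        · exact absurd hm (mySplit_ne_nil rest)
        · simp [mySplit, hc, hm, List.modifyHead]

theorem splitOn_eq (cs : List Char) : PySem.Chars.splitOn cs ['.'] = mySplit cs := by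
  rw [PySem.Chars.splitOn, go_eq (cs.length + 1) cs [] [] (by omega)]
  rcases hm : mySplit cs with _ | ⟨a, t⟩
  · exact absurd hm (mySplit_ne_nil cs)
  · simp [List.modifyHead]

theorem modifyHead_comp {α : Type} (f g : α → α) (l : List α) :
    (l.modifyHead g).modifyHead f = l.modifyHead (fun x => f (g x)) := by
  cases l <;> simp

theorem filt_eq : ∀ (cs : List Char) (p : List Char),
    (((mySplit cs).modifyHead (p ++ ·)).filter (fun x => decide (0 < x.length))).map
        (fun x => (x.length : Int)) = groupsW p.length cs := by
  intro cs
  induction cs with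
  | nil =>
    intro p
    by_cases hp : 0 < p.length <;>
      simp [mySplit, List.modifyHead, groupsW, List.filter, hp] <;> omega
  | cons c cs ih =>
    intro p
    have ih0 : ((mySplit cs).filter (fun x => decide (0 < x.length))).map
        (fun x => (x.length : Int)) = groupsW 0 cs := by
      have := ih []
      simpa [modifyHead_fun_id] using this
    by_cases hc : c = '.'
    · subst hc
      have hsplit : mySplit ('.' :: cs) = [] :: mySplit cs := by simp [mySplit]
      rw [hsplit]
      simp only [List.modifyHead, List.append_nil]
      rw [List.filter_cons]
      by_cases hp : 0 < p.length
      · simp only [hp, decide_true, if_true, List.map_cons, ih0]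
        simp [groupsW, hp]
      · simp only [hp, decide_false, Bool.false_eq_true, if_false, ih0]
        simp [groupsW, hp]
    · have hsplit : mySplit (c :: cs) = (mySplit cs).modifyHead (c :: ·) := by simp [mySplit, hc]
      rw [hsplit, modifyHead_comp]
      have harr : (fun x => p ++ c :: x) = (fun x => (p ++ [c]) ++ x) := by
        funext x; simp
      rw [harr, ih (p ++ [c])]
      simp [groupsW, hc]

-- acceptance of an optional final state
def acceptO (m : Int) (info : List Int) : Option (Int × Int) → Bool
  | none => false
  | some p => acceptB m info p.1 p.2

theorem runB_cons (m : Int) (info : List Int) (s : Option (Int × Int)) (c : Char) (cs : List Char) :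
    runB m info s (c :: cs) = runB m info (stepO m info s c) cs := rfl

theorem stepO_dot_zero (m : Int) (info : List Int) (g : Int) :
    stepO m info (some (g, ((0 : Nat) : Int))) '.' = some (g, ((0 : Nat) : Int)) := by
  simp [stepO]

theorem stepO_dot_succ (m : Int) (info : List Int) (g r : Nat) :
    stepO m info (some ((g : Int), ((r + 1 : Nat) : Int))) '.' =
      if (g : Int) < m ∧ PySem.List.pyGet? info (g : Int) == some ((r + 1 : Nat) : Int) then
        some (((g + 1 : Nat) : Int), ((0 : Nat) : Int))
      else none := by
  have hne : ¬(((r + 1 : Nat) : Int) = 0) := by push_cast; omega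
  simp only [stepO, if_neg hne, reduceIte]
  split_ifs with h
  · push_cast; ring_nf
  · rfl

theorem stepO_nondot (m : Int) (info : List Int) (g r : Nat) (c : Char) (hc : c ≠ '.') :
    stepO m info (some ((g : Int), (r : Int))) c = some ((g : Int), ((r + 1 : Nat) : Int)) := by
  simp only [stepO, if_neg hc]
  push_cast; rfl

-- the online automaton accepts from state (g, r) exactly when the remaining groups match
theorem aut (info : List Int) : ∀ (cs : List Char) (g r : Nat), g ≤ info.length →
    (acceptO (info.length : Int) info
        (runB (info.length : Int) info (some ((g : Int), (r : Int))) cs) = true ↔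
      info.drop g = groupsW r cs) := by
  intro cs
  induction cs with
  | nil =>
    intro g r hg
    cases r with
    | zero =>
      simp [runB, acceptO, acceptB, groupsW, List.drop_eq_nil_iff]
      omega
    | succ r =>
      by_cases hlt : g < info.length
      · rw [List.drop_eq_getElem_cons hlt]
        simp only [runB, List.foldl_nil, acceptO, acceptB, groupsW, Nat.zero_lt_succ, if_pos]
        rw [PySem.List.pyGet?_natCast, List.getElem?_eq_getElem hlt]
        simp only [Nat.cast_succ, Bool.or_eq_true, Bool.and_eq_true, beq_iff_eq, decide_eq_true_iff,
          Option.some.injEq]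
        constructor
        · rintro (⟨h1, h2⟩ | ⟨⟨h1, h2⟩, h3⟩)
          · omega
          · rw [h3]
            have : info.drop (g + 1) = [] := List.drop_eq_nil_iff.mpr (by omega)
            rw [this]
        · intro h
          have h1 : info[g] = (r : Int) + 1 := (List.cons.injEq _ _ _ _ ▸ h).1
          have h2 : info.drop (g + 1) = [] := (List.cons.injEq _ _ _ _ ▸ h).2
          rw [List.drop_eq_nil_iff] at h2
          right
          exact ⟨⟨by omega, by omega⟩, h1⟩
      · have hge : g = info.length := by omega
        subst hge
        have hnone : PySem.List.pyGet? info ((info.length : Nat) : Int) = none := by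
          rw [PySem.List.pyGet?_natCast]
          exact List.getElem?_eq_none (le_refl info.length)
        have hdrop : info.drop info.length = [] := List.drop_eq_nil_iff.mpr (le_refl _)
        simp [runB, acceptO, acceptB, groupsW, hnone, hdrop]
        omega
  | cons c cs ih =>
    intro g r hg
    rw [runB_cons]
    by_cases hc : c = '.'
    · subst hc
      cases r with
      | zero =>
        rw [stepO_dot_zero, ih g 0 hg]
        simp [groupsW]
      | succ r =>
        rw [stepO_dot_succ]
        by_cases hcond : (g : Int) < (info.length : Int) ∧
            PySem.List.pyGet? info (g : Int) == some ((r + 1 : Nat) : Int)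
        · have hlt : g < info.length := by exact_mod_cast hcond.1
          have hginfo : info[g] = ((r + 1 : Nat) : Int) := by
            have := hcond.2
            rw [PySem.List.pyGet?_natCast, List.getElem?_eq_getElem hlt] at this
            simpa using this
          rw [if_pos hcond, ih (g + 1) 0 (by omega)]
          rw [List.drop_eq_getElem_cons hlt]
          simp [groupsW, hginfo]
        · rw [if_neg hcond, runB_none]
          simp only [acceptO, groupsW, Nat.zero_lt_succ, if_pos]
          constructor
          · intro h; exact absurd h (by simp)
          · intro h
            exfalso
            have hne : info.drop g ≠ [] := by rw [h]; simp
            have hlt : g < info.length := by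
              by_contra hx
              exact hne (List.drop_eq_nil_iff.mpr (by omega))
            rw [List.drop_eq_getElem_cons hlt] at h
            have hginfo : info[g] = ((r + 1 : Nat) : Int) := by
              have := (List.cons.injEq _ _ _ _ ▸ h).1
              push_cast at this ⊢
              exact this
            apply hcond
            refine ⟨by exact_mod_cast hlt, ?_⟩
            rw [PySem.List.pyGet?_natCast, List.getElem?_eq_getElem hlt]
            simp [hginfo]
    · rw [stepO_nondot _ _ _ _ _ hc, ih g (r + 1) hg]
      simp [groupsW, hc]

theorem intersperse_nil_flatten {α : Type} (l : List (List α)) :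
    (List.intersperse [] l).flatten = l.flatten := by
  induction l with
  | nil => rfl
  | cons a t ih =>
    cases t with
    | nil => rfl
    | cons b t2 =>
      rw [show List.intersperse ([] : List α) (a :: b :: t2) = a :: [] :: List.intersperse [] (b :: t2) by
        simp [List.intersperse]]
      simp only [List.flatten_cons] at ih ⊢
      rw [ih]
      simp

theorem join_empty_toList (built : List String) :
    (PySem.Str.join "" built).toList = (built.map String.toList).flatten := by
  rw [PySem.Str.join, String.toList_ofList, PySem.Chars.join]
  have : ("" : String).toList = [] := rfl
  rw [this, List.intercalate, intersperse_nil_flatten]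

-- A's `correct` is the acceptance test of the automaton run over the joined characters
theorem correctA_eq (built : List String) (info : List Int) :
    correctA built info =
      acceptO (info.length : Int) info
        (runB (info.length : Int) info (some (0, 0)) ((built.map String.toList).flatten)) := by
  rw [Bool.eq_iff_iff]
  set cs := (built.map String.toList).flatten with hcs
  have hsplit : (PySem.Str.split? (PySem.Str.join "" built) ".").getD [] =
      (mySplit cs).map String.ofList := by
    rw [PySem.Str.split?]
    have hsep : (("." : String)).toList = ['.'] := rfl
    rw [hsep, PySem.Chars.split?]
    rw [if_neg (by simp)]
    rw [join_empty_toList, splitOn_eq]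
    rfl
  have hcounts :
      (((PySem.Str.split? (PySem.Str.join "" built) ".").getD []).filter
          (fun x => decide (0 < PySem.Str.len x))).map PySem.Str.len =
        ((mySplit cs).filter (fun x => decide (0 < x.length))).map (fun x => (x.length : Int)) := by
    rw [hsplit, List.filter_map, List.map_map]
    simp [Function.comp_def, PySem.Str.len]
  have hfilt : ((mySplit cs).filter (fun x => decide (0 < x.length))).map (fun x => (x.length : Int)) =
      groupsW 0 cs := by
    have := filt_eq cs []
    simpa [modifyHead_fun_id] using this
  have haut := aut info cs 0 0 (Nat.zero_le _)
  rw [correctA]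
  simp only [hcounts, hfilt]
  rw [show ((0 : Nat) : Int) = (0 : Int) from rfl] at haut
  rw [haut]
  constructor
  · intro h
    have : groupsW 0 cs = info := by exact_mod_cast (by simpa using h : groupsW 0 cs = info)
    simp [this]
  · intro h
    simp only [List.drop_zero] at h
    simp [← h]

theorem runB_single (m : Int) (info : List Int) (s : Option (Int × Int)) (c : Char) :
    runB m info s [c] = stepO m info s c := rfl

-- A computes cntB over the characters it still has to read
theorem A_eq (record : String) (info : List Int) : ∀ (need : Nat) (built : List String) (i : Int),
    ((built.length : Int) + need = PySem.Str.len record) →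
    (need = 0 ∨ (-(PySem.Str.len record) ≤ i ∧ i + need ≤ PySem.Str.len record)) →
    numThatWork record info built i =
      cntB (info.length : Int) info (suffChars record i need)
        (runB (info.length : Int) info (some (0, 0)) ((built.map String.toList).flatten)) := by
  intro need
  induction need with
  | zero =>
    intro built i hlen _
    rw [numThatWork]
    rw [if_pos (by push_cast at hlen ⊢; omega)]
    rw [correctA_eq]
    cases hs : runB (info.length : Int) info (some (0, 0)) ((built.map String.toList).flatten) with
    | none => simp [suffChars, cntB, acceptO]
    | some p => simp [suffChars, cntB, acceptO]
  | succ need ih =>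
    intro built i hlen hval
    have hval' : -(PySem.Str.len record) ≤ i ∧ i + (need + 1 : Nat) ≤ PySem.Str.len record := by
      rcases hval with h | h
      · omega
      · exact h
    rw [PySem.Str.len] at hval'
    have hsome : PySem.Str.pyGet? record i ≠ none := by
      rw [PySem.Str.pyGet?, PySem.Chars.pyGet?_eq_listPyGet?]
      intro hcon
      rw [PySem.List.pyGet?_eq_none_iff] at hcon
      apply hcon
      constructor
      · have := hval'.1; exact_mod_cast this
      · have := hval'.2; push_cast at this; omega
    obtain ⟨c, hc⟩ := Option.ne_none_iff_exists'.mp hsome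
    have hsuff : suffChars record i (need + 1) = c :: suffChars record (i + 1) need := by
      rw [suffChars, hc]; rfl
    rw [numThatWork, if_neg (by push_cast at hlen ⊢; omega), hsuff]
    split
    · rename_i heq; rw [heq] at hc; cases hc
    · rename_i c' heq
      rw [heq] at hc
      injection hc with hcc
      subst hcc
      by_cases hq : c' = '?'
      · rw [if_pos hq]
        subst hq
        rw [ih (built ++ ["."]) (i + 1) (by simp only [List.length_append, List.length_singleton, PySem.Str.len] at hlen ⊢; push_cast at hlen ⊢; omega)
              (by rcases Nat.eq_zero_or_pos need with h0 | h0
                  · exact Or.inl h0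
                  · refine Or.inr ⟨by simp only [PySem.Str.len]; push_cast at hval' ⊢; omega, by simp only [PySem.Str.len]; push_cast at hval' ⊢; omega⟩),
            ih (built ++ ["#"]) (i + 1) (by simp only [List.length_append, List.length_singleton, PySem.Str.len] at hlen ⊢; push_cast at hlen ⊢; omega)
              (by rcases Nat.eq_zero_or_pos need with h0 | h0
                  · exact Or.inl h0
                  · refine Or.inr ⟨by simp only [PySem.Str.len]; push_cast at hval' ⊢; omega, by simp only [PySem.Str.len]; push_cast at hval' ⊢; omega⟩)]
        rw [cntB, if_pos rfl]
        have hd : (((built ++ ["."]).map String.toList).flatten) =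
            ((built.map String.toList).flatten) ++ ['.'] := by simp
        have hh : (((built ++ ["#"]).map String.toList).flatten) =
            ((built.map String.toList).flatten) ++ ['#'] := by simp
        rw [hd, hh, runB_append, runB_append, runB_single, runB_single]
      · rw [if_neg hq]
        rw [ih (built ++ [String.ofList [c']]) (i + 1) (by simp only [List.length_append, List.length_singleton, PySem.Str.len] at hlen ⊢; push_cast at hlen ⊢; omega)
              (by rcases Nat.eq_zero_or_pos need with h0 | h0
                  · exact Or.inl h0
                  · refine Or.inr ⟨by simp only [PySem.Str.len]; push_cast at hval' ⊢; omega, by simp only [PySem.Str.len]; push_cast at hval' ⊢; omega⟩)]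
        rw [cntB, if_neg hq]
        have hx : (((built ++ [String.ofList [c']]).map String.toList).flatten) =
            ((built.map String.toList).flatten) ++ [c'] := by simp
        rw [hx, runB_append, runB_single]

-- ---------- the memoized recursion computes cntB ----------

theorem memoOK_empty (record : String) (info : List Int) (m bLen iA : Int) :
    MemoOK record info m bLen iA PySem.Dict.empty := by
  intro j st v h
  rw [PySem.Dict.get?_empty] at h
  cases h

-- the main invariant: with a sound memo, countM returns the pure count and a sound memo
theorem countM_spec (record : String) (info : List Int) (m bLen iA : Int) :
    ∀ (need : Nat) (j : Int) (s : Option (Int × Int)) (memo : PySem.Dict (Int × (Int × Int)) Int),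
    bLen + (j - iA) + need = PySem.Str.len record →
    (need = 0 ∨ (-(PySem.Str.len record) ≤ j ∧ j + need ≤ PySem.Str.len record)) →
    MemoOK record info m bLen iA memo →
    (countM record info m bLen iA j s memo).1 = cntB m info (suffChars record j need) s ∧
      MemoOK record info m bLen iA (countM record info m bLen iA j s memo).2 := by
  intro need
  induction need with
  | zero =>
    intro j s memo hlen _ hmemo
    cases s with
    | none => exact ⟨by simp [countM, cntB_none], by simp only [countM]; exact hmemo⟩
    | some st =>
      simp only [countM]
      rw [if_pos (by push_cast at hlen ⊢; omega)]
      exact ⟨rfl, hmemo⟩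
  | succ need ih =>
    intro j s memo hlen hval
    have hval' : -(PySem.Str.len record) ≤ j ∧ j + (need + 1 : Nat) ≤ PySem.Str.len record := by
      rcases hval with h | h
      · omega
      · exact h
    intro hmemo
    cases s with
    | none => exact ⟨by simp [countM, cntB_none], by simp only [countM]; exact hmemo⟩
    | some st =>
      rw [PySem.Str.len] at hval'
      have hsome : PySem.Str.pyGet? record j ≠ none := by
        rw [PySem.Str.pyGet?, PySem.Chars.pyGet?_eq_listPyGet?]
        intro hcon
        rw [PySem.List.pyGet?_eq_none_iff] at hcon
        apply hcon
        constructor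
        · have := hval'.1; exact_mod_cast this
        · have := hval'.2; push_cast at this; omega
      obtain ⟨c, hc⟩ := Option.ne_none_iff_exists'.mp hsome
      have hsuff : suffChars record j (need + 1) = c :: suffChars record (j + 1) need := by
        rw [suffChars, hc]; rfl
      have hT : (PySem.Str.len record - bLen - (j - iA)).toNat = need + 1 := by
        push_cast at hlen; omega
      have hlen1 : bLen + ((j + 1) - iA) + (need : Int) = PySem.Str.len record := by
        push_cast at hlen ⊢; omega
      have hval1 : (need = 0 ∨ (-(PySem.Str.len record) ≤ j + 1 ∧ (j + 1) + (need : Int) ≤ PySem.Str.len record)) := by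
        rcases Nat.eq_zero_or_pos need with h0 | h0
        · exact Or.inl h0
        · refine Or.inr ⟨by simp only [PySem.Str.len]; push_cast at hval' ⊢; omega,
            by simp only [PySem.Str.len]; push_cast at hval' ⊢; omega⟩
      simp only [countM]
      rw [if_neg (by push_cast at hlen ⊢; omega)]
      by_cases hct : memo.contains (j, st) = true
      · rw [if_pos hct]
        refine ⟨?_, hmemo⟩
        have hnn : memo.get? (j, st) ≠ none := by
          intro hcon
          rw [PySem.Dict.get?_eq_none_iff_contains] at hcon
          simp [hct] at hcon
        obtain ⟨v, hv⟩ := Option.ne_none_iff_exists'.mp hnn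
        have := hmemo j st v hv
        simp only [PySem.Dict.getD, hv, Option.getD_some]
        rw [this, hT]
      · rw [if_neg hct]
        -- recompute; the pyGet? match takes the `some c` branch
        split
        · rename_i heq; rw [heq] at hc; cases hc
        · rename_i c' heq
          rw [heq] at hc
          injection hc with hcc
          subst hcc
          by_cases hq : c' = '?'
          · rw [if_pos hq]
            subst hq
            obtain ⟨e1, k1⟩ := ih (j + 1) (stepO m info (some st) '.') memo hlen1 hval1 hmemo
            obtain ⟨e2, k2⟩ := ih (j + 1) (stepO m info (some st) '#')
              (countM record info m bLen iA (j + 1) (stepO m info (some st) '.') memo).2 hlen1 hval1 k1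
            have hvalcomb :
                (countM record info m bLen iA (j + 1) (stepO m info (some st) '.') memo).1 +
                  (countM record info m bLen iA (j + 1) (stepO m info (some st) '#')
                    (countM record info m bLen iA (j + 1) (stepO m info (some st) '.') memo).2).1 =
                cntB m info (suffChars record j (need + 1)) (some st) := by
              rw [e1, e2, hsuff, cntB, if_pos rfl]
            refine ⟨hvalcomb, ?_⟩
            intro j' st' v' hget
            rw [PySem.Dict.get?_insert] at hget
            by_cases hk : (j', st') = (j, st)
            · rw [if_pos hk] at hget
              injection hget with hv'
              obtain ⟨hj', hst'⟩ := Prod.mk.injEq .. ▸ hk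
              subst hj'; subst hst'
              rw [← hv', hvalcomb, hT]
            · rw [if_neg hk] at hget
              exact k2 j' st' v' hget
          · rw [if_neg hq]
            obtain ⟨e1, k1⟩ := ih (j + 1) (stepO m info (some st) c') memo hlen1 hval1 hmemo
            have hvalcomb :
                (countM record info m bLen iA (j + 1) (stepO m info (some st) c') memo).1 =
                cntB m info (suffChars record j (need + 1)) (some st) := by
              rw [e1, hsuff, cntB, if_neg hq]
            refine ⟨hvalcomb, ?_⟩
            intro j' st' v' hget
            rw [PySem.Dict.get?_insert] at hget
            by_cases hk : (j', st') = (j, st)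
            · rw [if_pos hk] at hget
              injection hget with hv'
              obtain ⟨hj', hst'⟩ := Prod.mk.injEq .. ▸ hk
              subst hj'; subst hst'
              rw [← hv', hvalcomb, hT]
            · rw [if_neg hk] at hget
              exact k1 j' st' v' hget

-- B computes the same cntB value
theorem B_eq (record : String) (info : List Int) (built : List String) (i : Int) (need : Nat)
    (hlen : (built.length : Int) + need = PySem.Str.len record)
    (hval : need = 0 ∨ (-(PySem.Str.len record) ≤ i ∧ i + need ≤ PySem.Str.len record)) :
    numThatWork_alt record info built i =
      cntB (info.length : Int) info (suffChars record i need)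
        (runB (info.length : Int) info (some (0, 0)) ((built.map String.toList).flatten)) := by
  rw [numThatWork_alt]
  exact (countM_spec record info (info.length : Int) (built.length : Int) i need i
    (((built.map String.toList).flatten).foldl (fun s c => stepO (info.length : Int) info s c) (some (0, 0)))
    PySem.Dict.empty (by push_cast at hlen ⊢; omega) hval
    (memoOK_empty record info (info.length : Int) (built.length : Int) i)).1

-- ===== VERDICT (by name: the statement is the Claim_ definition above) =====
theorem numThatWork_spec : Claim_equal_numThatWork := by
  intro record info built i _hdom hpre
  unfold Spec_numThatWork
  rcases hpre with hb | ⟨hlt, hge, hle⟩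
  · rw [A_eq record info 0 built i (by simpa using hb) (Or.inl rfl),
        B_eq record info built i 0 (by simpa using hb) (Or.inl rfl)]
  · have hneed : ((PySem.Str.len record - (built.length : Int)).toNat : Int) =
        PySem.Str.len record - (built.length : Int) := by omega
    rw [A_eq record info (PySem.Str.len record - (built.length : Int)).toNat built i
          (by omega) (Or.inr ⟨hge, by omega⟩),
        B_eq record info built i (PySem.Str.len record - (built.length : Int)).toNat
          (by omega) (Or.inr ⟨hge, by omega⟩)]
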